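-- pv_equiv track=rewrite | github.com/sunbeam-labs/sunbeam | sunbeam/bfx/reports.py | rows_from_dicts
-- ===== SOURCE A (Python) =====
-- def rows_from_dicts(ds, empty_value=""):
--     # assume that first dict has all keys
--     # use order of keys in first dict
--     keys = None
--     for d in ds:
--         if keys is None:
--             keys = list(d.keys())
--             yield keys
--         vals = [d.get(k, empty_value) for k in keys]
--         yield vals
-- ===== SOURCE B (Python) =====
-- def rows_from_dicts(ds, empty_value=""):
--     # Column-major strategy: build one column per key of the first dict,
--     # then emit the header and reassemble each row from the columns.
--     ds = list(ds)
--     if not ds: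
--         return
--     keys = list(ds[0].keys())
--     cols = [[d.get(k, empty_value) for d in ds] for k in keys]
--     yield keys
--     for i in range(len(ds)):
--         yield [col[i] for col in cols]
-- ===== Notes on version B (the rewrite author's own statement) =====
-- stated objective: alternative
-- what changed: B traverses the data column-major: it materialises one column per key (a pass over all dicts per key) and then reassembles each value row by index from the columns, instead of A's single row-major pass with a keys-is-None sentinel.
import Mathlib
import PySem

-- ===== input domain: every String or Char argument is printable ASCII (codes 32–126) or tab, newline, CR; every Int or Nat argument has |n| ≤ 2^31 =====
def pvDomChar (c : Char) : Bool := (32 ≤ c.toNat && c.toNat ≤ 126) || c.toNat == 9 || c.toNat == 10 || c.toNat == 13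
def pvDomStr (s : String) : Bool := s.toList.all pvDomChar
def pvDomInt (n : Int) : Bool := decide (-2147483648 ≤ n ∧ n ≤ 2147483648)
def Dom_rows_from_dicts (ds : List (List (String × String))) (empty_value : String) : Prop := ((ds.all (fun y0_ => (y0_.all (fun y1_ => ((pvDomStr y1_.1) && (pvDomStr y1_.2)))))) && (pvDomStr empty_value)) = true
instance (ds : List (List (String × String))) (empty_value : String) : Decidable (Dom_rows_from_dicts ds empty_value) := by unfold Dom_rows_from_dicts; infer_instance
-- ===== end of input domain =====

-- B reassembles rows column-major (one column per key, then index i over the columns) instead of A's row-major pass with a keys-is-None sentinel; return value = the list of yielded rows (both are generators).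


-- ===== PORT A =====
-- A: one row-major loop over ds with a 'keys = None' sentinel; on the first dict set keys and yield them, then yield each dict's value row.
def rowsA_step (empty_value : String) (st : Option (List String) × List (List String))
    (d : List (String × String)) : Option (List String) × List (List String) :=
  let dd := PySem.Dict.ofList d
  match st.1 with
  | none =>
      let keys := dd.keys
      (some keys, st.2 ++ [keys] ++ [keys.map (fun k => dd.getD k empty_value)])
  | some keys =>
      (some keys, st.2 ++ [keys.map (fun k => dd.getD k empty_value)])

def rows_from_dicts (ds : List (List (String × String))) (empty_value : String) : List (List String) :=
  (ds.foldl (rowsA_step empty_value) (none, [])).2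

-- ===== PORT B =====
-- B: keys from the first dict; one column per key (a pass over all of ds per key); then row i is col[i] over the columns.
-- 'col[i]' is in range by construction (each column has length ds.length and i ranges over range(len(ds))), so pyGetD is exact here.
def rows_from_dicts_alt (ds : List (List (String × String))) (empty_value : String) : List (List String) :=
  match ds with
  | [] => []
  | first :: rest =>
      let ds' := first :: rest
      let keys := (PySem.Dict.ofList first).keys
      let cols := keys.map (fun k => ds'.map (fun d => (PySem.Dict.ofList d).getD k empty_value))
      keys :: (PySem.List.pyRange 0 ds'.length 1).map
        (fun i => cols.map (fun col => PySem.List.pyGetD col i ""))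

-- ===== PRECONDITION & SPEC =====
def Spec_rows_from_dicts (ds : List (List (String × String))) (empty_value : String) (out : List (List String)) : Prop := out = rows_from_dicts_alt ds empty_value
instance (ds : List (List (String × String))) (empty_value : String) (out : List (List String)) : Decidable (Spec_rows_from_dicts ds empty_value out) := by unfold Spec_rows_from_dicts; infer_instance

-- ===== CLAIM =====
def Claim_equal_rows_from_dicts : Prop := ∀ (ds : List (List (String × String))) (empty_value : String), Dom_rows_from_dicts ds empty_value → Spec_rows_from_dicts ds empty_value (rows_from_dicts ds empty_value)

-- ===== LEMMAS AND PROOFS =====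
-- A's fold, once keys are fixed, appends one value row per remaining dict.
theorem foldA_some (empty_value : String) (keys : List String) :
    ∀ (rest : List (List (String × String))) (acc : List (List String)),
    (rest.foldl (rowsA_step empty_value) (some keys, acc)).2
      = acc ++ rest.map (fun d => keys.map (fun k => (PySem.Dict.ofList d).getD k empty_value)) := by
  intro rest
  induction rest with
  | nil => intro acc; simp
  | cons d rest ih =>
      intro acc
      simp only [List.foldl, List.map]
      rw [rowsA_step, ih]
      simp

-- Reading row i out of the column store gives exactly the row-major value row of ds[i].
theorem cols_row (empty_value : String) (keys : List String)
    (ds : List (List (String × String))) (i : Nat) (hi : i < ds.length) :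
    (keys.map (fun k => ds.map (fun d => (PySem.Dict.ofList d).getD k empty_value))).map
        (fun col => PySem.List.pyGetD col (i : Int) "")
      = keys.map (fun k => (PySem.Dict.ofList ds[i]).getD k empty_value) := by
  rw [List.map_map]
  apply List.map_congr_left
  intro k _
  simp [PySem.List.pyGetD_natCast, List.getD, List.getElem?_map,
        List.getElem?_eq_getElem hi]

-- The transpose read-back over range(len(ds)) reproduces the row-major map over ds.
theorem transpose_rows (empty_value : String) (keys : List String)
    (ds : List (List (String × String))) :
    (PySem.List.pyRange 0 ds.length 1).map
        (fun i => (keys.map (fun k => ds.map (fun d => (PySem.Dict.ofList d).getD k empty_value))).map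
          (fun col => PySem.List.pyGetD col i ""))
      = ds.map (fun d => keys.map (fun k => (PySem.Dict.ofList d).getD k empty_value)) := by
  rw [PySem.List.pyRange_one]
  simp only [List.map_map]
  apply List.ext_getElem
  · simp
  · intro n h1 h2
    simp only [List.getElem_map, List.getElem_range, Function.comp]
    have hn : n < ds.length := by simpa using h2
    rw [show ((0 : Int) + n) = (n : Int) by ring, ← List.map_map, cols_row empty_value keys ds n hn]

-- ===== VERDICT =====
theorem rows_from_dicts_spec : Claim_equal_rows_from_dicts := by
  intro ds empty_value _
  unfold Spec_rows_from_dicts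
  cases ds with
  | nil => rfl
  | cons first rest =>
      simp only [rows_from_dicts, rows_from_dicts_alt, List.foldl]
      rw [rowsA_step, foldA_some, transpose_rows]
      simp
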